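-- pv_equiv track=rewrite | github.com/yokotak/pftp | Puzzle2/party-exercise2.py | maxcountCulc
-- ===== SOURCE A (Python) =====
-- def maxcountCulc(count_for_start_time):
--     max_count = 0
--     time = 0
--     for ci in count_for_start_time:
--         if ci[1] > max_count:
--             max_count = ci[1]
--             time = ci[0]
--
--     return max_count, time
-- ===== SOURCE B (Python) =====
-- def maxcountCulc(count_for_start_time):
--     # two passes: aggregate the max count, then locate its first start time
--     max_count = max((c for _, c in count_for_start_time), default=0)
--     if max_count <= 0:
--         return 0, 0
--     time = 0
--     for t, c in count_for_start_time:
--         if c == max_count: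
--             time = t
--             break
--     return max_count, time
-- ===== Notes on version B (the rewrite author's own statement) =====
-- stated objective: alternative
-- what changed: Replaces A's single accumulating max-and-time fold by two separate linear passes: first compute the maximum count (floored at 0 by A's baseline), then scan for the first start time carrying that count.
import Mathlib
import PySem

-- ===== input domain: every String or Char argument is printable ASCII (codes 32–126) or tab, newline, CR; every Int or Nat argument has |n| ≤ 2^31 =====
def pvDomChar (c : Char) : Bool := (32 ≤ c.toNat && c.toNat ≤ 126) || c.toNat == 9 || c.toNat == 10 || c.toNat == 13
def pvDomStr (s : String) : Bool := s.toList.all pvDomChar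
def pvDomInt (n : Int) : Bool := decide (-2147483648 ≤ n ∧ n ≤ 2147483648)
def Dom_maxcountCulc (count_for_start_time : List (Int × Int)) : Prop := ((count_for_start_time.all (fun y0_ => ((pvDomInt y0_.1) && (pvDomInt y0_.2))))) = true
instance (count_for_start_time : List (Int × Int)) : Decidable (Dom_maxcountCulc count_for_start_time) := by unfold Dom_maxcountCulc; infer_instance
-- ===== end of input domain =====

-- B differs from A by decomposition only: two linear passes (aggregate the max, then locate
-- its first start time) instead of A's single accumulating fold; same values everywhere.

-- ===== PORT A =====
-- A: one fold carrying (max_count, time), updating both on a strict new maximum.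
def maxcountCulc (count_for_start_time : List (Int × Int)) : Int × Int :=
  count_for_start_time.foldl
    (fun acc ci => if ci.2 > acc.1 then (ci.2, ci.1) else acc)
    (0, 0)

-- ===== PORT B =====
-- B helper: the break-loop — first start time whose count equals m (0 if none, the
-- loop's initial value of `time`).
def firstTimeOf (m : Int) : List (Int × Int) → Int
  | [] => 0
  | (t, c) :: rest => if c = m then t else firstTimeOf m rest

def maxcountCulc_alt (count_for_start_time : List (Int × Int)) : Int × Int :=
  let max_count := (PySem.List.max? (count_for_start_time.map Prod.snd) (fun y => y)).getD 0
  if max_count ≤ 0 then (0, 0)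
  else (max_count, firstTimeOf max_count count_for_start_time)

-- ===== PRECONDITION & SPEC =====
def Spec_maxcountCulc (count_for_start_time : List (Int × Int)) (out : Int × Int) : Prop := out = maxcountCulc_alt count_for_start_time
instance (count_for_start_time : List (Int × Int)) (out : Int × Int) : Decidable (Spec_maxcountCulc count_for_start_time out) := by unfold Spec_maxcountCulc; infer_instance

-- ===== CLAIM (what is proved, stated in full; the proofs are below) =====
def Claim_equal_maxcountCulc : Prop := ∀ (count_for_start_time : List (Int × Int)), Dom_maxcountCulc count_for_start_time → Spec_maxcountCulc count_for_start_time (maxcountCulc count_for_start_time)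

-- ===== LEMMAS AND PROOFS =====

-- The running maximum over the second components, seeded with m.
def runMax (l : List (Int × Int)) (m : Int) : Int :=
  l.foldl (fun a p => max a p.2) m

theorem le_runMax (l : List (Int × Int)) (m : Int) : m ≤ runMax l m := by
  induction l generalizing m with
  | nil => simp [runMax]
  | cons p t ih =>
      have := ih (max m p.2)
      simp only [runMax, List.foldl] at *
      exact le_trans (le_max_left m p.2) this

-- Characterisation of A's accumulating fold in terms of runMax and firstTimeOf.
theorem foldA_char (l : List (Int × Int)) (m t : Int) :
    l.foldl (fun acc ci => if ci.2 > acc.1 then (ci.2, ci.1) else acc) (m, t)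
      = if runMax l m = m then (m, t)
        else (runMax l m, firstTimeOf (runMax l m) l) := by
  induction l generalizing m t with
  | nil => simp [runMax]
  | cons p rest ih =>
      have hM : runMax (p :: rest) m = runMax rest (max m p.2) := by
        simp [runMax]
      by_cases hp : p.2 > m
      · -- accumulator becomes (p.2, p.1)
        have hmax : max m p.2 = p.2 := max_eq_right (le_of_lt hp)
        have hne' : runMax rest p.2 ≠ m := by
          have := le_runMax rest p.2; omega
        simp only [List.foldl, if_pos hp, ih p.2 p.1, hM, hmax]
        by_cases h2 : runMax rest p.2 = p.2
        · rw [if_pos h2, if_neg hne', h2]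
          simp [firstTimeOf]
        · rw [if_neg h2, if_neg hne']
          have hgt : p.2 < runMax rest p.2 :=
            lt_of_le_of_ne (le_runMax rest p.2) (fun h => h2 h.symm)
          have hskip : firstTimeOf (runMax rest p.2) (p :: rest)
               = firstTimeOf (runMax rest p.2) rest := by
            simp [firstTimeOf]; intro h; omega
          rw [hskip]
      · -- accumulator unchanged; max m p.2 = m
        have hmax : max m p.2 = m := max_eq_left (by omega)
        simp only [List.foldl, if_neg hp, ih m t, hM, hmax]
        by_cases h2 : runMax rest m = m
        · rw [if_pos h2, if_pos h2]
        · rw [if_neg h2, if_neg h2]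
          have hgt : m < runMax rest m :=
            lt_of_le_of_ne (le_runMax rest m) (fun h => h2 h.symm)
          have hskip : firstTimeOf (runMax rest m) (p :: rest)
               = firstTimeOf (runMax rest m) rest := by
            simp [firstTimeOf]; intro h; omega
          rw [hskip]

theorem fold_map_snd (r : List (Int × Int)) (a : Int) :
    (r.map Prod.snd).foldl max a = runMax r a := by
  induction r generalizing a with
  | nil => rfl
  | cons q t ih => simp only [List.map, List.foldl, runMax] at *; exact ih (max a q.2)

theorem max0_runMax (r : List (Int × Int)) (a : Int) :
    runMax r (max 0 a) = max 0 (runMax r a) := by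
  induction r generalizing a with
  | nil => rfl
  | cons q t ih =>
      simp only [runMax, List.foldl] at *
      rw [max_assoc]
      exact ih (max a q.2)

-- B's aggregated maximum (Python max with default 0) versus runMax seeded with 0.
theorem maxGetD_eq (l : List (Int × Int)) :
    max 0 ((PySem.List.max? (l.map Prod.snd) (fun y => y)).getD 0) = runMax l 0 := by
  cases l with
  | nil => simp [runMax, PySem.List.max?]
  | cons p rest =>
      have h := PySem.List.max?_id_cons p.2 (rest.map Prod.snd)
      simp only [List.map, h, Option.getD_some, fold_map_snd]
      have : runMax (p :: rest) 0 = runMax rest (max 0 p.2) := by simp [runMax]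
      rw [this, max0_runMax]

-- ===== VERDICT (by name: the statement is the Claim_ definition above) =====
theorem maxcountCulc_spec : Claim_equal_maxcountCulc := by
  intro l _
  unfold Spec_maxcountCulc maxcountCulc maxcountCulc_alt
  rw [foldA_char l 0 0]
  have hm := maxGetD_eq l
  set mB := (PySem.List.max? (l.map Prod.snd) (fun y => y)).getD 0 with hmB
  by_cases h : mB ≤ 0
  · have h0 : runMax l 0 = 0 := by rw [← hm]; omega
    simp [h0, if_pos h]
  · have h0 : runMax l 0 = mB := by rw [← hm]; omega
    have hne : runMax l 0 ≠ 0 := by omega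
    rw [if_neg hne, if_neg h, h0]
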